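-- pv_equiv track=rewrite | github.com/TimMaa/advent-of-code | 2024/20/app.py | find_cheats
-- ===== SOURCE A (Python) =====
-- def find_cheats(path, cheat_length):
--     cheats = {}
--     for c_val, c_node in path.items():
--         for t_val, t_node in path.items():
--             distance = abs(c_node[0] - t_node[0]) + abs(c_node[1] - t_node[1])
--             time_save = t_val - c_val - distance
--             if distance <= cheat_length and time_save > 0:
--                 if time_save not in cheats.keys():
--                     cheats[time_save] = []
--                 cheats[time_save].append((c_node, t_node))
--     return cheats
-- ===== SOURCE B (Python) =====
-- def find_cheats(path, cheat_length):
--     order = list(enumerate(path.items()))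
--     byval = sorted(order, key=lambda e: e[1][0], reverse=True)
--     cheats = {}
--     for c_val, c_node in path.items():
--         cand = []
--         for e in byval:
--             t_val, t_node = e[1]
--             if t_val <= c_val:
--                 break
--             d = abs(c_node[0] - t_node[0]) + abs(c_node[1] - t_node[1])
--             if d <= cheat_length and t_val - c_val - d > 0:
--                 cand.append(e)
--         cand.sort(key=lambda e: e[0])
--         for _, (t_val, t_node) in cand:
--             ts = t_val - c_val - (abs(c_node[0] - t_node[0]) + abs(c_node[1] - t_node[1]))
--             cheats.setdefault(ts, []).append((c_node, t_node))
--     return cheats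
-- ===== Notes on version B (the rewrite author's own statement) =====
-- stated objective: alternative
-- what changed: Instead of A's full inner scan of all targets in path order, B pre-sorts the enumerated entries once by value descending, scans each centre's candidates with an early break as soon as t_val <= c_val (no later target can qualify), and restores path order by sorting the few survivors on their enumeration index before grouping.
import Mathlib
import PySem

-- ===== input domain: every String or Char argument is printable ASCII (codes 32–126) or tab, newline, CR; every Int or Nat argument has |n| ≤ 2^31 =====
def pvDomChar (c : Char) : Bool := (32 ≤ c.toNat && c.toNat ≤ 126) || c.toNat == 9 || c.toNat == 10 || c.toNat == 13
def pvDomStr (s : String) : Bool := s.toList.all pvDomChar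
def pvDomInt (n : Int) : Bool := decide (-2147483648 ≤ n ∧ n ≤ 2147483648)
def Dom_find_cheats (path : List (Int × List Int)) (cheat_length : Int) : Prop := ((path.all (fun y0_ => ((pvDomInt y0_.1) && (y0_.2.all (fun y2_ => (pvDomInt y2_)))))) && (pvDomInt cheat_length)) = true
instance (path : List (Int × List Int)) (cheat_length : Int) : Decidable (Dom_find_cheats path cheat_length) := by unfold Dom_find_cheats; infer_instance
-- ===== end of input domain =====

-- B re-orders A's inner scan: targets are visited in descending-value order with an early break
-- (no target with t_val ≤ c_val can ever qualify) and the survivors are put back into path order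
-- by their enumeration index before grouping — an alternative traversal proved to give A's exact dict.

-- ===== PORT A =====
def find_cheats (path : List (Int × List Int)) (cheat_length : Int) : List (Int × List (List Int × List Int)) :=
  (path.foldl (fun (cheats : PySem.Dict Int (List (List Int × List Int))) c =>
    path.foldl (fun cheats t =>
      let distance := |PySem.List.pyGetD c.2 0 0 - PySem.List.pyGetD t.2 0 0| +
                      |PySem.List.pyGetD c.2 1 0 - PySem.List.pyGetD t.2 1 0|
      let time_save := t.1 - c.1 - distance
      if distance ≤ cheat_length ∧ time_save > 0 then
        let cheats := if time_save ∈ cheats.keys then cheats else cheats.insert time_save []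
        cheats.modify time_save [] (fun l => l ++ [(c.2, t.2)])
      else cheats) cheats) PySem.Dict.empty).items

-- ===== PORT B =====
-- |c[0]-t[0]| + |c[1]-t[1]|, the Manhattan distance both programs compute
def fcDist (cn tn : List Int) : Int :=
  |PySem.List.pyGetD cn 0 0 - PySem.List.pyGetD tn 0 0| +
  |PySem.List.pyGetD cn 1 0 - PySem.List.pyGetD tn 1 0|

-- Source B's inner 'for e in byval: … if t_val <= c_val: break …' loop collecting cand
def fcScan (c_val : Int) (c_node : List Int) (cl : Int) :
    List (Int × (Int × List Int)) → List (Int × (Int × List Int))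
  | [] => []
  | e :: rest =>
    if e.2.1 ≤ c_val then []
    else if fcDist c_node e.2.2 ≤ cl ∧ e.2.1 - c_val - fcDist c_node e.2.2 > 0 then
      e :: fcScan c_val c_node cl rest
    else fcScan c_val c_node cl rest

def find_cheats_alt (path : List (Int × List Int)) (cheat_length : Int) : List (Int × List (List Int × List Int)) :=
  let byval := PySem.List.sorted (PySem.List.enumerate path 0) (fun e => e.2.1) true
  (path.foldl (fun (cheats : PySem.Dict Int (List (List Int × List Int))) c =>
      let cand := PySem.List.sorted (fcScan c.1 c.2 cheat_length byval) (fun e => e.1) false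
      cand.foldl (fun cheats e =>
        let ts := e.2.1 - c.1 - fcDist c.2 e.2.2
        (cheats.setdefault ts []).modify ts [] (fun l => l ++ [(c.2, e.2.2)])) cheats)
    PySem.Dict.empty).items

-- ===== PRECONDITION & SPEC =====
-- Pre_ excludes only the inputs with a coordinate list of fewer than two entries, where Python A
-- raises IndexError reading node[0]/node[1].
def Pre_find_cheats (path : List (Int × List Int)) (cheat_length : Int) : Prop :=
  ∀ p ∈ path, 2 ≤ p.2.length
instance (path : List (Int × List Int)) (cheat_length : Int) : Decidable (Pre_find_cheats path cheat_length) := by unfold Pre_find_cheats; infer_instance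

def pvWitness_find_cheats : (List (Int × List Int)) × Int := ([(0, [0, 0]), (6, [0, 1])], 2)

def Spec_find_cheats (path : List (Int × List Int)) (cheat_length : Int) (out : List (Int × List (List Int × List Int))) : Prop := out = find_cheats_alt path cheat_length
instance (path : List (Int × List Int)) (cheat_length : Int) (out : List (Int × List (List Int × List Int))) : Decidable (Spec_find_cheats path cheat_length out) := by unfold Spec_find_cheats; infer_instance

-- ===== CLAIM (what is proved, stated in full; the proofs are below) =====
def Claim_equal_find_cheats : Prop := ∀ (path : List (Int × List Int)) (cheat_length : Int), Dom_find_cheats path cheat_length → Pre_find_cheats path cheat_length → Spec_find_cheats path cheat_length (find_cheats path cheat_length)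

-- ===== LEMMAS AND PROOFS =====

-- the qualifying condition both programs test, as a predicate on one enumerated entry
def fcCond (c : Int × List Int) (cl : Int) (e : Int × (Int × List Int)) : Bool :=
  decide (fcDist c.2 e.2.2 ≤ cl ∧ e.2.1 - c.1 - fcDist c.2 e.2.2 > 0)

lemma fcCond_val_gt (c : Int × List Int) (cl : Int) (e : Int × (Int × List Int))
    (h : fcCond c cl e = true) : c.1 < e.2.1 := by
  have h' := of_decide_eq_true h
  have hd : 0 ≤ fcDist c.2 e.2.2 := by
    unfold fcDist; positivity
  omega

-- the break loop returns exactly the qualifying entries, on a value-descending list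
lemma fcScan_eq_filter (c : Int × List Int) (cl : Int) (l : List (Int × (Int × List Int)))
    (h : l.Pairwise (fun a b => b.2.1 ≤ a.2.1)) :
    fcScan c.1 c.2 cl l = l.filter (fcCond c cl) := by
  induction l with
  | nil => rfl
  | cons e rest ih =>
    rw [List.pairwise_cons] at h
    obtain ⟨hle, hrest⟩ := h
    by_cases hb : e.2.1 ≤ c.1
    · have hall : ∀ b ∈ e :: rest, fcCond c cl b = false := by
        intro b hbmem
        cases hF : fcCond c cl b with
        | false => rfl
        | true =>
          have hgt := fcCond_val_gt c cl b hF
          rw [List.mem_cons] at hbmem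
          rcases hbmem with rfl | hbmem
          · omega
          · have := hle b hbmem; omega
      rw [List.filter_eq_nil_iff.mpr (fun b hb' => by simp [hall b hb'])]
      simp [fcScan, hb]
    · by_cases hc : fcDist c.2 e.2.2 ≤ cl ∧ e.2.1 - c.1 - fcDist c.2 e.2.2 > 0
      · have hT : fcCond c cl e = true := decide_eq_true hc
        simp only [fcScan, if_neg hb, if_pos hc, List.filter_cons, hT, if_pos]
        simp [ih hrest]
      · have hF : fcCond c cl e = false := decide_eq_false hc
        simp only [fcScan, if_neg hb, if_neg hc, List.filter_cons, hF]
        simp [ih hrest]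

-- sorting the survivors back by index restores their path (enumeration) order
lemma sorted_filter_enumerate (path : List (Int × List Int)) (p : (Int × (Int × List Int)) → Bool) :
    PySem.List.sorted
      ((PySem.List.sorted (PySem.List.enumerate path 0) (fun e => e.2.1) true).filter p)
      (fun e => e.1) false
    = (PySem.List.enumerate path 0).filter p := by
  apply PySem.List.sorted_eq_of_perm_of_pairwise_lt
  · exact (List.Perm.filter p (PySem.List.sorted_perm (PySem.List.enumerate path 0) (fun e => e.2.1) true)).symm
  · exact List.Pairwise.filter p (PySem.List.pairwise_lt_enumerate path 0)

-- A's "if ts not in keys: insert []" is B's setdefault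
lemma keys_insert_eq_setdefault (d : PySem.Dict Int (List (List Int × List Int))) (k : Int) :
    (if k ∈ d.keys then d else d.insert k ([] : List (List Int × List Int))) = d.setdefault k [] := by
  by_cases h : k ∈ d.keys
  · have hc : d.contains k = true := (PySem.Dict.contains_iff_mem_keys d k).mpr h
    simp [PySem.Dict.setdefault, hc, h]
  · have hc : d.contains k = false := by
      by_contra hcc
      exact h ((PySem.Dict.contains_iff_mem_keys d k).mp (by revert hcc; cases d.contains k <;> simp))
    apply PySem.Dict.ext
    simp only [PySem.Dict.setdefault, hc, h, Bool.false_eq_true, if_false,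
      PySem.Dict.items_insert]

-- per-centre: B's scan–sort–group pass equals A's inner path scan, for any accumulator
lemma inner_eq (path : List (Int × List Int)) (cl : Int) (c : Int × List Int)
    (cheats : PySem.Dict Int (List (List Int × List Int))) :
    (PySem.List.sorted
        (fcScan c.1 c.2 cl (PySem.List.sorted (PySem.List.enumerate path 0) (fun e => e.2.1) true))
        (fun e => e.1) false).foldl
      (fun cheats e =>
        let ts := e.2.1 - c.1 - fcDist c.2 e.2.2
        (cheats.setdefault ts []).modify ts [] (fun l => l ++ [(c.2, e.2.2)])) cheats
    = path.foldl (fun cheats t =>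
        let distance := |PySem.List.pyGetD c.2 0 0 - PySem.List.pyGetD t.2 0 0| +
                        |PySem.List.pyGetD c.2 1 0 - PySem.List.pyGetD t.2 1 0|
        let time_save := t.1 - c.1 - distance
        if distance ≤ cl ∧ time_save > 0 then
          let cheats := if time_save ∈ cheats.keys then cheats else cheats.insert time_save []
          cheats.modify time_save [] (fun l => l ++ [(c.2, t.2)])
        else cheats) cheats := by
  -- left side: scan = filter, sort restores enumeration order
  rw [fcScan_eq_filter c cl _ (PySem.List.sorted_pairwise_rev _ _),
      sorted_filter_enumerate path (fcCond c cl)]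
  -- right side: rewrite A's step into the setdefault form, then conditional fold = fold over filter
  have hstep : (fun (cheats : PySem.Dict Int (List (List Int × List Int))) (t : Int × List Int) =>
        let distance := |PySem.List.pyGetD c.2 0 0 - PySem.List.pyGetD t.2 0 0| +
                        |PySem.List.pyGetD c.2 1 0 - PySem.List.pyGetD t.2 1 0|
        let time_save := t.1 - c.1 - distance
        if distance ≤ cl ∧ time_save > 0 then
          let cheats := if time_save ∈ cheats.keys then cheats else cheats.insert time_save []
          cheats.modify time_save [] (fun l => l ++ [(c.2, t.2)])
        else cheats)
      = (fun cheats t =>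
          if fcDist c.2 t.2 ≤ cl ∧ t.1 - c.1 - fcDist c.2 t.2 > 0 then
            (cheats.setdefault (t.1 - c.1 - fcDist c.2 t.2) []).modify
              (t.1 - c.1 - fcDist c.2 t.2) [] (fun l => l ++ [(c.2, t.2)])
          else cheats) := by
    funext cheats t
    show (if fcDist c.2 t.2 ≤ cl ∧ t.1 - c.1 - fcDist c.2 t.2 > 0 then
            (if t.1 - c.1 - fcDist c.2 t.2 ∈ cheats.keys then cheats
             else cheats.insert (t.1 - c.1 - fcDist c.2 t.2) []).modify
              (t.1 - c.1 - fcDist c.2 t.2) [] (fun l => l ++ [(c.2, t.2)])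
          else cheats) = _
    rw [keys_insert_eq_setdefault]
  rw [hstep, PySem.List.foldl_ite_eq_foldl_filter
        (fun t : Int × List Int => fcDist c.2 t.2 ≤ cl ∧ t.1 - c.1 - fcDist c.2 t.2 > 0)
        (fun cheats t =>
          (cheats.setdefault (t.1 - c.1 - fcDist c.2 t.2) []).modify
            (t.1 - c.1 - fcDist c.2 t.2) [] (fun l => l ++ [(c.2, t.2)])) path cheats]
  -- both folds now run the same step over the same entries, B through the enumeration
  have hmap : path.filter
        (fun t => decide (fcDist c.2 t.2 ≤ cl ∧ t.1 - c.1 - fcDist c.2 t.2 > 0))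
      = ((PySem.List.enumerate path 0).filter (fcCond c cl)).map (fun e => e.2) := by
    conv_lhs => rw [← PySem.List.map_snd_enumerate path 0]
    rw [List.filter_map]
    rfl
  rw [hmap, List.foldl_map]

-- ===== VERDICT (by name: the statement is the Claim_ definition above) =====
theorem find_cheats_spec : Claim_equal_find_cheats := by
  intro path cheat_length _ _
  unfold Spec_find_cheats find_cheats find_cheats_alt
  congr 1
  apply PySem.List.foldl_congr_mem
  intro cheats x _
  exact (inner_eq path cheat_length x cheats).symm
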